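-- pv_equiv track=rewrite | github.com/NaomiOkiddy/Python | python_practice/count_hole.py | count_hole
-- ===== SOURCE A (Python) =====
-- def count_hole(num):
-- 	hole_count = {0:1, 1:0, 2:0, 3:0, 4:1, 5:0, 6:1, 7:0, 8:2, 9:1}
-- 	num_list = []
-- 	sum = 0
--
-- 	while num > 0:
-- 		num_list.append(num%10)
-- 		num = num // 10
--
-- 	for i in range(len(num_list)):
-- 		sum += hole_count[num_list[i]]
-- 	return sum
-- ===== SOURCE B (Python) =====
-- def count_hole(num):
--     hole = {'0': 1, '1': 0, '2': 0, '3': 0, '4': 1,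
--             '5': 0, '6': 1, '7': 0, '8': 2, '9': 1}
--     if num <= 0:
--         return 0
--     return sum(hole[d] for d in str(num))
-- ===== Notes on version B (the rewrite author's own statement) =====
-- stated objective: simpler
-- what changed: B sums hole counts over the decimal digit characters of str(num) (dict keyed by characters, with a guard returning zero for non-positive num), instead of A's arithmetic digit-extraction loop that builds an intermediate list and then sums it by index.
import Mathlib
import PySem

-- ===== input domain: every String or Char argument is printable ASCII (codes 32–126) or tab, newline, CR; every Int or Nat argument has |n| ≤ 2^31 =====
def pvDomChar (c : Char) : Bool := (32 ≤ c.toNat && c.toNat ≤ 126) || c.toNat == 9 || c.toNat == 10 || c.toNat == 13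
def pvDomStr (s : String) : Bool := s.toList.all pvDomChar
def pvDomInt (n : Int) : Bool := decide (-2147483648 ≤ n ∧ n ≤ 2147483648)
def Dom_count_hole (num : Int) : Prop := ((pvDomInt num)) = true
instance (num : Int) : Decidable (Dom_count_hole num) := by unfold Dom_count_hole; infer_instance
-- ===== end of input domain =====

-- B sums hole counts over the decimal string of num (digit-character keys, with a num<=0 guard)
-- instead of A's arithmetic %10 // 10 loop building an index-summed digit list; objective: simpler.

-- ===== PORT A =====
-- the 'while num > 0' loop: appends num%10 to num_list and floor-divides num by 10
def countHoleBuild (num : Int) (num_list : List Int) : List Int :=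
  if num > 0 then
    countHoleBuild (PySem.Int.floordiv num 10) (num_list ++ [PySem.Int.mod num 10])
  else num_list
termination_by num.toNat
decreasing_by
  rw [PySem.Int.floordiv_eq_ediv_of_pos (by norm_num : (0:Int) < 10)]
  omega

def count_hole (num : Int) : Int :=
  let hole_count : PySem.Dict Int Int :=
    PySem.Dict.ofList [(0,1),(1,0),(2,0),(3,0),(4,1),(5,0),(6,1),(7,0),(8,2),(9,1)]
  let num_list := countHoleBuild num []
  -- hole_count[num_list[i]]: every stored digit is in 0..9, so the KeyError branch is unreachable
  (PySem.List.pyRange 0 (PySem.List.len num_list)).foldl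
    (fun s i => s + hole_count.getD (PySem.List.pyGetD num_list i 0) 0) 0

-- ===== PORT B =====
def count_hole_alt (num : Int) : Int :=
  let hole : PySem.Dict String Int :=
    PySem.Dict.ofList [("0",1),("1",0),("2",0),("3",0),("4",1),("5",0),("6",1),("7",0),("8",2),("9",1)]
  if num ≤ 0 then 0
  -- hole[d]: every character of str(num) for num > 0 is a digit, so the KeyError branch is unreachable
  else ((PySem.Int.toStr num).toList.map (fun d => hole.getD (String.ofList [d]) 0)).sum

-- ===== PRECONDITION & SPEC =====
def Spec_count_hole (num : Int) (out : Int) : Prop := out = count_hole_alt num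
instance (num : Int) (out : Int) : Decidable (Spec_count_hole num out) := by unfold Spec_count_hole; infer_instance

-- ===== CLAIM (what is proved, stated in full; the proofs are below) =====
def Claim_equal_count_hole : Prop := ∀ (num : Int), Dom_count_hole num → Spec_count_hole num (count_hole num)

-- ===== LEMMAS AND PROOFS =====

-- digit hole table, arithmetic form
def pvHd (k : Nat) : Int :=
  if k = 0 then 1 else if k = 4 then 1 else if k = 6 then 1 else if k = 8 then 2 else if k = 9 then 1 else 0

-- common reference value: hole-count sum over the decimal digits of n
def pvHsum (n : Nat) : Int :=
  if n = 0 then 0 else pvHd (n % 10) + pvHsum (n / 10)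
decreasing_by exact Nat.div_lt_self (by omega) (by norm_num)

theorem countHoleBuild_acc (num : Int) (acc : List Int) :
    countHoleBuild num acc = acc ++ countHoleBuild num [] := by
  generalize hm : num.toNat = m
  induction m using Nat.strong_induction_on generalizing num acc with
  | _ m ih =>
    by_cases h : num > 0
    · have hlt : (PySem.Int.floordiv num 10).toNat < m := by
        rw [PySem.Int.floordiv_eq_ediv_of_pos (by norm_num : (0:Int) < 10)]
        omega
      rw [countHoleBuild, if_pos h, ih _ hlt _ _ rfl]
      conv_rhs => rw [countHoleBuild, if_pos h, ih _ hlt _ _ rfl]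
      simp
    · rw [countHoleBuild, if_neg h]
      conv_rhs => rw [countHoleBuild, if_neg h]
      simp

theorem pvGA_digit (k : Nat) (hk : k < 10) :
    (PySem.Dict.ofList ([(0,1),(1,0),(2,0),(3,0),(4,1),(5,0),(6,1),(7,0),(8,2),(9,1)] :
      List (Int × Int))).getD (k : Int) 0 = pvHd k := by
  interval_cases k <;> decide

theorem pvGB_digit (k : Nat) (hk : k < 10) :
    (PySem.Dict.ofList ([("0",1),("1",0),("2",0),("3",0),("4",1),("5",0),("6",1),("7",0),("8",2),("9",1)] :
      List (String × Int))).getD (String.ofList [Nat.digitChar k]) 0 = pvHd k := by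
  interval_cases k <;> decide

theorem pvA_eq_hsum (n : Nat) :
    ((countHoleBuild (n : Int) []).map
      (fun d => (PySem.Dict.ofList ([(0,1),(1,0),(2,0),(3,0),(4,1),(5,0),(6,1),(7,0),(8,2),(9,1)] :
        List (Int × Int))).getD d 0)).sum = pvHsum n := by
  induction n using Nat.strong_induction_on with
  | _ n ih =>
    by_cases h0 : n = 0
    · subst h0; rw [countHoleBuild, if_neg (by norm_num), pvHsum]; simp
    · have hf : PySem.Int.floordiv (n : Int) 10 = ((n / 10 : Nat) : Int) := by
        exact_mod_cast PySem.Int.floordiv_natCast n 10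
      have hm : PySem.Int.mod (n : Int) 10 = ((n % 10 : Nat) : Int) := by
        exact_mod_cast PySem.Int.mod_natCast n 10
      rw [countHoleBuild, if_pos (by exact_mod_cast Nat.pos_of_ne_zero h0),
        countHoleBuild_acc, hf, hm]
      simp only [List.map_append, List.sum_append, List.map_cons, List.map_nil,
        List.sum_cons, List.sum_nil, List.nil_append]
      rw [ih (n / 10) (Nat.div_lt_self (Nat.pos_of_ne_zero h0) (by norm_num)),
        pvGA_digit (n % 10) (Nat.mod_lt n (by omega))]
      conv_rhs => rw [pvHsum]
      rw [if_neg h0]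
      ring

theorem pvB_eq_hsum (n : Nat) (hn : 0 < n) :
    ((Nat.toDigits 10 n).map
      (fun d => (PySem.Dict.ofList ([("0",1),("1",0),("2",0),("3",0),("4",1),("5",0),("6",1),("7",0),("8",2),("9",1)] :
        List (String × Int))).getD (String.ofList [d]) 0)).sum = pvHsum n := by
  induction n using Nat.strong_induction_on with
  | _ n ih =>
    rw [Nat.toDigits_eq_if (by norm_num)]
    by_cases h : n < 10
    · rw [if_pos h]
      simp only [List.map_cons, List.map_nil, List.sum_cons, List.sum_nil]
      rw [pvGB_digit n h, pvHsum, if_neg (by omega), Nat.mod_eq_of_lt h,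
        Nat.div_eq_of_lt h, pvHsum]
      simp
    · rw [if_neg h]
      simp only [List.map_append, List.sum_append, List.map_cons, List.map_nil,
        List.sum_cons, List.sum_nil]
      rw [ih (n / 10) (Nat.div_lt_self hn (by norm_num)) (by omega),
        pvGB_digit (n % 10) (Nat.mod_lt n (by omega))]
      conv_rhs => rw [pvHsum]
      rw [if_neg (by omega)]
      ring

-- ===== VERDICT (by name: the statement is the Claim_ definition above) =====
theorem count_hole_spec : Claim_equal_count_hole := by
  intro num _
  unfold Spec_count_hole count_hole count_hole_alt
  by_cases h : num ≤ 0
  · rw [if_pos h, countHoleBuild, if_neg (by omega)]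
    simp [PySem.List.len, PySem.List.pyRange]
  · rw [if_neg h]
    have hfold := PySem.List.foldl_pyRange_pyGetD (countHoleBuild num [])
      (0 : Int)
      (fun s d => s + (PySem.Dict.ofList ([(0,1),(1,0),(2,0),(3,0),(4,1),(5,0),(6,1),(7,0),(8,2),(9,1)] :
        List (Int × Int))).getD d 0) 0 (le_refl 0)
    simp only [Int.toNat_zero, List.drop_zero] at hfold
    rw [hfold, ← List.foldl_map, ← List.sum_eq_foldl]
    have hnum : ((num.toNat : Nat) : Int) = num := by omega
    rw [← hnum, pvA_eq_hsum]
    rw [PySem.Int.toList_toStr, PySem.Int.toChars, if_neg (by omega)]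
    simp only [Int.toNat_natCast]
    exact (pvB_eq_hsum num.toNat (by omega)).symm
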